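-- pv_equiv track=rewrite | github.com/HayLab/AlleleSail | alleleSail_sim.py | all_option
-- ===== SOURCE A (Python) =====
-- import copy
--
-- def all_option(subset, overset, replacement = 0):
--     """Determines whether all elements of the subset are in the overset, either with (replacement = 1) or
--     without replacement (= 0)"""
--
--     subsetcopy = copy.deepcopy(subset)
--     oversetcopy = copy.deepcopy(overset)
--
--     if replacement:
--         check = 1
--         for item in subsetcopy:
--             if not item in oversetcopy:
--                 check = 0
--                 break
--
--         return(check)
--
--     else:
--         check = 1
--         for item in subsetcopy:
--             if item in oversetcopy:
--                 oversetcopy.remove(item)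
--
--             else:
--                 check = 0
--                 break
--
--         return(check)
-- ===== SOURCE B (Python) =====
-- def all_option(subset, overset, replacement=0):
--     """Determines whether all elements of the subset are in the overset, either with (replacement = 1) or
--     without replacement (= 0)"""
--     if replacement:
--         return int(all(item in overset for item in subset))
--     else:
--         return int(all(subset.count(item) <= overset.count(item) for item in subset))
-- ===== Notes on version B (the rewrite author's own statement) =====
-- stated objective: simpler
-- what changed: Replaced the deepcopy-and-destructive-consume loop (removing matched items from a mutated overset copy) by a pure counting criterion: multiset containment holds iff every subset element's count in subset is at most its count in overset; the replacement branch becomes a plain all(... in ...).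
import Mathlib
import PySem

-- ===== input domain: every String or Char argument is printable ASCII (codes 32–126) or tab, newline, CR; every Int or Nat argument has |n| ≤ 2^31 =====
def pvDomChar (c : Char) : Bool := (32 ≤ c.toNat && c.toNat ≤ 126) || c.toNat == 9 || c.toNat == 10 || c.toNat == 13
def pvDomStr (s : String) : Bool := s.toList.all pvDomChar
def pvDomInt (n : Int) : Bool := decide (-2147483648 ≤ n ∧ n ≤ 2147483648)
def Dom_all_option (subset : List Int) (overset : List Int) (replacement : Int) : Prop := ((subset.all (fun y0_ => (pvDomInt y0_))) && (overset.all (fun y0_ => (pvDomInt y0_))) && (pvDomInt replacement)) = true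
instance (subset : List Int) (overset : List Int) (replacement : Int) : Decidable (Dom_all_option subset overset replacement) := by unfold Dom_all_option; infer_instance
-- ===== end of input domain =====

-- B replaces A's deepcopy-and-destructive-consume loop by a pure counting criterion (objective: simpler).
-- A's deepcopies never reach the caller, so no observable mutation is at stake.

-- ===== PORT A =====
-- replacement branch: 'for item in subsetcopy: if not item in oversetcopy: check = 0; break'
def allOptionLoopRep : List Int → List Int → Int
  | [], _ => 1
  | x :: xs, ov => if x ∈ ov then allOptionLoopRep xs ov else 0

-- no-replacement branch: 'if item in oversetcopy: oversetcopy.remove(item) else: check = 0; break'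
-- List.erase removes the first occurrence, exactly Python's list.remove on ints (guarded by the ∈ test).
def allOptionLoopNoRep : List Int → List Int → Int
  | [], _ => 1
  | x :: xs, ov => if x ∈ ov then allOptionLoopNoRep xs (ov.erase x) else 0

def all_option (subset : List Int) (overset : List Int) (replacement : Int) : Int :=
  if replacement ≠ 0 then allOptionLoopRep subset overset
  else allOptionLoopNoRep subset overset

-- ===== PORT B =====
def all_option_alt (subset : List Int) (overset : List Int) (replacement : Int) : Int :=
  if replacement ≠ 0 then
    (if subset.all (fun item => item ∈ overset) then 1 else 0)
  else
    (if subset.all (fun item => PySem.List.count subset item ≤ PySem.List.count overset item) then 1 else 0)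

-- ===== PRECONDITION & SPEC =====
def Spec_all_option (subset : List Int) (overset : List Int) (replacement : Int) (out : Int) : Prop := out = all_option_alt subset overset replacement
instance (subset : List Int) (overset : List Int) (replacement : Int) (out : Int) : Decidable (Spec_all_option subset overset replacement out) := by unfold Spec_all_option; infer_instance

-- ===== CLAIM (what is proved, stated in full; the proofs are below) =====
def Claim_equal_all_option : Prop := ∀ (subset : List Int) (overset : List Int) (replacement : Int), Dom_all_option subset overset replacement → Spec_all_option subset overset replacement (all_option subset overset replacement)

-- ===== LEMMAS AND PROOFS =====

theorem allOptionLoopRep_eq (xs ov : List Int) :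
    allOptionLoopRep xs ov = if xs.all (fun item => item ∈ ov) then 1 else 0 := by
  induction xs with
  | nil => simp [allOptionLoopRep]
  | cons x xs ih =>
      simp only [allOptionLoopRep, List.all_cons, ih]
      by_cases hx : x ∈ ov <;> simp [hx]

theorem allOptionLoopNoRep_eq (xs ov : List Int) :
    allOptionLoopNoRep xs ov =
      if ∀ y ∈ xs, List.count y xs ≤ List.count y ov then 1 else 0 := by
  induction xs generalizing ov with
  | nil => simp [allOptionLoopNoRep]
  | cons x xs ih =>
      simp only [allOptionLoopNoRep]
      by_cases hx : x ∈ ov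
      · rw [if_pos hx, ih]
        have hcnt : 0 < List.count x ov := List.count_pos_iff.mpr hx
        have key : (∀ y ∈ xs, List.count y xs ≤ List.count y (ov.erase x)) ↔
            (∀ y ∈ x :: xs, List.count y (x :: xs) ≤ List.count y ov) := by
          constructor
          · intro h y hy
            rcases List.mem_cons.mp hy with rfl | hy'
            · by_cases hxs : y ∈ xs
              · have := h y hxs
                rw [List.count_erase] at this
                simp only [List.count_cons_self]
                simp at this
                omega
              · simp only [List.count_cons_self, List.count_eq_zero_of_not_mem hxs]
                omega
            · have := h y hy'
              rw [List.count_erase] at this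
              by_cases hyx : y = x
              · subst hyx
                simp only [List.count_cons_self]
                simp at this
                omega
              · have hne : (x == y) = false := by simpa using Ne.symm hyx
                rw [List.count_cons_of_ne (Ne.symm hyx)]
                simp [hne] at this
                omega
          · intro h y hy
            rw [List.count_erase]
            by_cases hyx : y = x
            · subst hyx
              have := h y (List.mem_cons_self)
              simp only [List.count_cons_self] at this
              simp
              omega
            · have := h y (List.mem_cons_of_mem _ hy)
              rw [List.count_cons_of_ne (Ne.symm hyx)] at this
              have hne : (x == y) = false := by simp [Ne.symm hyx]
              simp [hne]
              omega
        by_cases hall : ∀ y ∈ xs, List.count y xs ≤ List.count y (ov.erase x)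
        · rw [if_pos hall, if_pos (key.mp hall)]
        · rw [if_neg hall, if_neg (fun h => hall (key.mpr h))]
      · rw [if_neg hx]
        have : ¬ (∀ y ∈ x :: xs, List.count y (x :: xs) ≤ List.count y ov) := by
          intro h
          have := h x (List.mem_cons_self)
          have h0 : List.count x ov = 0 := List.count_eq_zero_of_not_mem hx
          simp [List.count_cons_self, h0] at this
        rw [if_neg this]

theorem count_all_bridge (xs ov : List Int) :
    (xs.all (fun item => PySem.List.count xs item ≤ PySem.List.count ov item)) =
      decide (∀ y ∈ xs, List.count y xs ≤ List.count y ov) := by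
  simp only [PySem.List.count]
  rw [Bool.eq_iff_iff]
  simp [List.all_eq_true]

-- ===== VERDICT (by name: the statement is the Claim_ definition above) =====
theorem all_option_spec : Claim_equal_all_option := by
  intro subset overset replacement _
  unfold Spec_all_option all_option all_option_alt
  by_cases hr : replacement ≠ 0
  · simp only [if_pos hr, allOptionLoopRep_eq]
  · simp only [if_neg hr, allOptionLoopNoRep_eq, count_all_bridge]
    by_cases h : ∀ y ∈ subset, List.count y subset ≤ List.count y overset <;> simp [h]
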